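-- pv_equiv track=rewrite | github.com/glesica/missing-course | assignments/dumb_hash.py | dumb_hash
-- ===== SOURCE A (Python) =====
-- def dumb_hash(pw: str) -> str:
--     h = [0, 0, 0, 0, 0, 0, 0, 0]
--     i = 0
--     for c in pw:
--         if c in "ABCDEFGHIJKLMNOPQRSTUVWXYZ":
--             h[i] += ord(c)
--         elif c in "abcdefghijklmnopqrstuvwxyz":
--             h[i] += ord(c) * 2
--         else:
--             h[i] += ord(c) * 4
--
--         i = (i + 1) % len(h)
--
--     digest = ""
--     for v in h:
--         digest += hex(0x1000 + v)[2:6]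
--
--     return digest
-- ===== SOURCE B (Python) =====
-- def _weight(c):
--     o = ord(c)
--     if 65 <= o <= 90:
--         return o
--     if 97 <= o <= 122:
--         return o * 2
--     return o * 4
--
--
-- def _stride_sum(s):
--     total = 0
--     k = 0
--     while k < len(s):
--         total += _weight(s[k])
--         k += 8
--     return total
--
--
-- def dumb_hash(pw: str) -> str:
--     digest = ""
--     for j in range(8):
--         digest += hex(0x1000 + _stride_sum(pw[j:]))[2:6]
--     return digest
-- ===== Notes on version B (the rewrite author's own statement) =====
-- stated objective: alternative
-- what changed: Replaces the single interleaved loop that rotates a modulo-8 bucket index into a mutable 8-slot list with eight independent strided passes: bucket j is the class-weighted sum over positions j, j+8, j+16, ... of pw, and its 4-hex-digit chunk is emitted immediately, so no mutable list or rotating index exists.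
import Mathlib
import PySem

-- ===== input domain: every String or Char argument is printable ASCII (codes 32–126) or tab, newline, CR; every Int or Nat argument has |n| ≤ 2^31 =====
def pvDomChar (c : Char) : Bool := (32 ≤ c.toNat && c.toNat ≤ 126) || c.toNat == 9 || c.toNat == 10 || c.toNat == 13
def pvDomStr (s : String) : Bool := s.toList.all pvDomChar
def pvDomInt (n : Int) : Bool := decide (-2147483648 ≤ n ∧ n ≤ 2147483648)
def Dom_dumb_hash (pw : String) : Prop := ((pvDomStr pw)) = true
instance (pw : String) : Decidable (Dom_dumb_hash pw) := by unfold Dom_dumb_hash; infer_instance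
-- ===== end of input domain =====

-- B replaces A's single interleaved loop (rotating mod-8 bucket index into a mutable 8-slot
-- list) with eight independent strided passes, one per bucket; same cost, different decomposition.

-- shared helper: transliteration of Python's hex(n) for n ≥ 0 (both versions call hex on
-- 0x1000 + bucket, which is always ≥ 0 here); exact on nonnegative arguments
def hexDigitChar (n : Nat) : Char := "0123456789abcdef".toList.getD n '0'

def natToHex (n : Nat) : List Char :=
  if _h : n < 16 then [hexDigitChar n]
  else natToHex (n / 16) ++ [hexDigitChar (n % 16)]
  decreasing_by exact Nat.div_lt_self (by omega) (by omega)

-- hex(0x1000 + v)[2:6], the chunk both Pythons append per bucket ("0x" prefix then slice [2:6],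
-- done at the char-list level; exact since 0x1000 + v ≥ 0 on every reachable v)
def hexPart (v : Int) : String :=
  String.ofList (PySem.List.slice ('0' :: 'x' :: natToHex (0x1000 + v).toNat) (some 2) (some 6))

-- ===== PORT A =====
-- h[i] += x  (i is always 0 ≤ i < len h here, produced by % 8)
def bumpA (h : List Int) (i : Int) (x : Int) : List Int :=
  h.set i.toNat (h.getD i.toNat 0 + x)

-- the branch-selected increment of A's loop body
def weightA (c : Char) : Int :=
  if c ∈ "ABCDEFGHIJKLMNOPQRSTUVWXYZ".toList then (c.toNat : Int)
  else if c ∈ "abcdefghijklmnopqrstuvwxyz".toList then (c.toNat : Int) * 2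
  else (c.toNat : Int) * 4

def loopA : List Char → List Int → Int → List Int
  | [], h, _ => h
  | c :: cs, h, i =>
      let h' := bumpA h i (weightA c)
      loopA cs h' (PySem.Int.mod (i + 1) (h'.length : Int))

def dumb_hash (pw : String) : String :=
  let h := loopA pw.toList [0, 0, 0, 0, 0, 0, 0, 0] 0
  h.foldl (fun d v => d ++ hexPart v) ""

-- ===== PORT B =====
def weightB (c : Char) : Int :=
  if 65 ≤ c.toNat ∧ c.toNat ≤ 90 then (c.toNat : Int)
  else if 97 ≤ c.toNat ∧ c.toNat ≤ 122 then (c.toNat : Int) * 2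
  else (c.toNat : Int) * 4

-- while k < len(s): total += _weight(s[k]); k += 8   (k is checked in range before s[k])
def strideGo (s : List Char) (k : Nat) (total : Int) : Int :=
  if h : k < s.length then strideGo s (k + 8) (total + weightB s[k]) else total
  termination_by s.length - k

def strideSum (s : List Char) : Int := strideGo s 0 0

def dumb_hash_alt (pw : String) : String :=
  (PySem.List.pyRange 0 8 1).foldl
    (fun d j => d ++ hexPart (strideSum (PySem.List.slice pw.toList (some j) none))) ""

-- ===== PRECONDITION & SPEC =====
def Spec_dumb_hash (pw : String) (out : String) : Prop := out = dumb_hash_alt pw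
instance (pw : String) (out : String) : Decidable (Spec_dumb_hash pw out) := by unfold Spec_dumb_hash; infer_instance

-- ===== CLAIM (what is proved, stated in full; the proofs are below) =====
def Claim_equal_dumb_hash : Prop := ∀ (pw : String), Dom_dumb_hash pw → Spec_dumb_hash pw (dumb_hash pw)

-- ===== LEMMAS AND PROOFS =====

theorem mem_alpha_iff (c : Char) (lo : Nat) (l : List Char)
    (hl : l = (List.range 26).map (fun k => Char.ofNat (lo + k))) (hlo : lo + 26 < 1000) :
    c ∈ l ↔ lo ≤ c.toNat ∧ c.toNat ≤ lo + 25 := by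
  subst hl
  simp only [List.mem_map, List.mem_range]
  constructor
  · rintro ⟨k, hk, rfl⟩
    have : (Char.ofNat (lo + k)).toNat = lo + k := by
      rw [Char.toNat_ofNat, if_pos (Or.inl (by omega))]
    omega
  · rintro ⟨h1, h2⟩
    refine ⟨c.toNat - lo, by omega, ?_⟩
    have : lo + (c.toNat - lo) = c.toNat := by omega
    rw [this, Char.ofNat_toNat]

theorem mem_upper (c : Char) :
    c ∈ "ABCDEFGHIJKLMNOPQRSTUVWXYZ".toList ↔ 65 ≤ c.toNat ∧ c.toNat ≤ 90 := by
  simpa using mem_alpha_iff c 65 "ABCDEFGHIJKLMNOPQRSTUVWXYZ".toList (by decide) (by omega)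

theorem mem_lower (c : Char) :
    c ∈ "abcdefghijklmnopqrstuvwxyz".toList ↔ 97 ≤ c.toNat ∧ c.toNat ≤ 122 := by
  simpa using mem_alpha_iff c 97 "abcdefghijklmnopqrstuvwxyz".toList (by decide) (by omega)

theorem weightA_eq_weightB (c : Char) : weightA c = weightB c := by
  unfold weightA weightB
  simp only [mem_upper c, mem_lower c]

-- the weighted every-8th sum, structurally
def es : List Char → Int
  | [] => 0
  | c :: rest => weightB c + es (rest.drop 7)
  termination_by s => s.length
  decreasing_by simp

theorem strideGo_eq_aux (s : List Char) (n : Nat) :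
    ∀ k t, s.length - k ≤ n → strideGo s k t = t + es (s.drop k) := by
  induction n with
  | zero =>
      intro k t hk
      rw [strideGo, dif_neg (by omega), List.drop_eq_nil_of_le (by omega), es]
      ring
  | succ n ih =>
      intro k t hk
      by_cases h : k < s.length
      · rw [strideGo, dif_pos h, ih (k + 8) _ (by omega),
          List.drop_eq_getElem_cons h, es, List.drop_drop]
        have h78 : k + 1 + 7 = k + 8 := by omega
        rw [h78]
        ring
      · rw [strideGo, dif_neg h, List.drop_eq_nil_of_le (by omega), es]
        ring

theorem strideGo_eq (s : List Char) (k : Nat) (t : Int) :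
    strideGo s k t = t + es (s.drop k) :=
  strideGo_eq_aux s (s.length - k) k t le_rfl

-- S cs i j: the contribution cs adds to bucket j when the rotating index starts at i
def S : List Char → Int → Int → Int
  | [], _, _ => 0
  | c :: cs, i, j => (if i = j then weightB c else 0) + S cs ((i + 1) % 8) j

theorem pymod8 (i : Int) : PySem.Int.mod i 8 = i % 8 :=
  PySem.Int.mod_eq_emod_of_pos (by omega)

theorem S_eq_es (cs : List Char) (i j : Int) (hi0 : 0 ≤ i) (hi : i < 8)
    (hj0 : 0 ≤ j) (hj : j < 8) :
    S cs i j = es (cs.drop ((j - i) % 8).toNat) := by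
  induction cs generalizing i hi0 hi with
  | nil => simp [S, es]
  | cons c cs ih =>
      have hi'0 : 0 ≤ (i + 1) % 8 := by omega
      have hi'1 : (i + 1) % 8 < 8 := by omega
      by_cases h : i = j
      · subst h
        have hd : ((i - i) % 8).toNat = 0 := by omega
        have hd' : ((i - (i + 1) % 8) % 8).toNat = 7 := by omega
        rw [S, if_pos rfl, ih _ hi'0 hi'1, hd, hd', List.drop_zero, es]
      · have hd' : ((j - (i + 1) % 8) % 8).toNat = ((j - i) % 8).toNat - 1 := by omega
        rw [S, if_neg h, ih _ hi'0 hi'1, hd']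
        obtain ⟨k, hk⟩ : ∃ k, ((j - i) % 8).toNat = k + 1 := ⟨((j - i) % 8).toNat - 1, by omega⟩
        rw [hk]
        simp

theorem loopA_char (cs : List Char) (h : List Int) (i : Int)
    (hlen : h.length = 8) (hi0 : 0 ≤ i) (hi : i < 8) :
    loopA cs h i = (List.range 8).map (fun j => h.getD j 0 + S cs i (j : Int)) := by
  induction cs generalizing h i with
  | nil =>
      rw [loopA]
      apply List.ext_getElem
      · simp [hlen]
      · intro n h1 h2
        simp [S, List.getD_eq_getElem?_getD, List.getElem?_eq_getElem h1]
  | cons c cs ih =>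
      rw [loopA]
      have hlen' : (bumpA h i (weightA c)).length = 8 := by simp [bumpA, hlen]
      rw [hlen']
      have hmod : PySem.Int.mod (i + 1) ((8 : Nat) : Int) = (i + 1) % 8 := by
        push_cast
        exact pymod8 (i + 1)
      rw [hmod, ih _ _ hlen' (by omega) (by omega)]
      apply List.ext_getElem
      · simp
      · intro n h1 h2
        have hn8 : n < 8 := by simpa using h2
        simp only [List.getElem_map, List.getElem_range]
        rw [S, weightA_eq_weightB]
        simp only [bumpA, List.getD_eq_getElem?_getD, List.getElem?_set, hlen]
        by_cases hin : i = (n : Int)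
        · have : i.toNat = n := by omega
          rw [if_pos this, if_pos (by omega)]
          simp [hin]
          ring
        · have : i.toNat ≠ n := by omega
          rw [if_neg this, if_neg (by intro hc; exact hin (by omega))]
          ring_nf

-- ===== VERDICT (by name: the statement is the Claim_ definition above) =====
theorem dumb_hash_spec : Claim_equal_dumb_hash := by
  intro pw _
  unfold Spec_dumb_hash dumb_hash dumb_hash_alt
  rw [loopA_char pw.toList [0, 0, 0, 0, 0, 0, 0, 0] 0 rfl le_rfl (by omega)]
  have hr : List.range 8 = [0, 1, 2, 3, 4, 5, 6, 7] := rfl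
  have hp : PySem.List.pyRange 0 8 1 = [0, 1, 2, 3, 4, 5, 6, 7] := by decide
  have hstr : ∀ s, strideSum s = es s := fun s => by rw [strideSum, strideGo_eq]; simp
  have hS : ∀ (j : Nat), j < 8 → S pw.toList 0 (j : Int) = es (pw.toList.drop j) := by
    intro j hj
    rw [S_eq_es pw.toList 0 j le_rfl (by omega) (by omega) (by omega)]
    congr 2
    omega
  have hsl : ∀ (j : Int), 0 ≤ j →
      PySem.List.slice pw.toList (some j) none = pw.toList.drop j.toNat :=
    fun j hj => PySem.List.slice_from _ hj
  simp only [hr, hp, List.map, List.foldl, hstr]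
  have k0 : S pw.toList 0 0 = es (pw.toList.drop 0) := by simpa using hS 0 (by omega)
  have k1 : S pw.toList 0 1 = es (pw.toList.drop 1) := by simpa using hS 1 (by omega)
  have k2 : S pw.toList 0 2 = es (pw.toList.drop 2) := by simpa using hS 2 (by omega)
  have k3 : S pw.toList 0 3 = es (pw.toList.drop 3) := by simpa using hS 3 (by omega)
  have k4 : S pw.toList 0 4 = es (pw.toList.drop 4) := by simpa using hS 4 (by omega)
  have k5 : S pw.toList 0 5 = es (pw.toList.drop 5) := by simpa using hS 5 (by omega)
  have k6 : S pw.toList 0 6 = es (pw.toList.drop 6) := by simpa using hS 6 (by omega)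
  have k7 : S pw.toList 0 7 = es (pw.toList.drop 7) := by simpa using hS 7 (by omega)
  norm_num [k0, k1, k2, k3, k4, k5, k6, k7, hsl,
    show Int.toNat 2 = 2 from rfl, show Int.toNat 3 = 3 from rfl,
    show Int.toNat 4 = 4 from rfl, show Int.toNat 5 = 5 from rfl,
    show Int.toNat 6 = 6 from rfl, show Int.toNat 7 = 7 from rfl]
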